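-- pv_equiv track=rewrite | github.com/ryandavis3/leetcode | filesystem_path/filesystem_path2.py | getLenLongestStr
-- ===== SOURCE A (Python) =====
-- from typing import Dict, List
--
-- def getLenLongestStr(strs: List[str]) -> List[str]:
--     """
--     Get longest string in list of strings.
--     """
--     L = dict()
--     for s in strs:
--         L[s] = len(s)
--     if not L: # Empty sequence
--         return 0
--     longest = max(L, key=lambda k: L[k])
--     return L[longest]
-- ===== SOURCE B (Python) =====
-- from typing import List
--
-- def getLenLongestStr(strs: List[str]) -> int:
--     """
--     Length of the longest string: single pass with a running maximum,
--     no dict and no second scan.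
--     """
--     longest = 0
--     for s in strs:
--         longest = max(longest, len(s))
--     return longest
-- ===== Notes on version B (the rewrite author's own statement) =====
-- stated objective: simpler
-- what changed: Replaced A's two-phase dict construction plus max-over-keys scan by a single pass keeping a running maximum of the lengths (accumulator starts at 0, which also covers the empty list).
import Mathlib
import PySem

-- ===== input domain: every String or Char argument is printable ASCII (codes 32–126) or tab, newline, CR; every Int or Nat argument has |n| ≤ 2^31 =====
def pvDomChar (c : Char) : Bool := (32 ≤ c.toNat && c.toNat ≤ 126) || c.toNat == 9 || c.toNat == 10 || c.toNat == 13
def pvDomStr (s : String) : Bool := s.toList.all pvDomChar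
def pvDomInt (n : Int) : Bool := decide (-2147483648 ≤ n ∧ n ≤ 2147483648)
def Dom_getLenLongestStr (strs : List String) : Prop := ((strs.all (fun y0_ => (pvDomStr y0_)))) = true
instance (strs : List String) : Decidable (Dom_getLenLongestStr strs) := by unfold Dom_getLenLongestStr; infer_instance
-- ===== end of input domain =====

-- B replaces A's dict + max-over-keys second scan by a single running-maximum pass (simpler, O(1) extra space).


-- ===== PORT A =====
-- 'L = dict(); for s in strs: L[s] = len(s)'; 'if not L: return 0';
-- 'longest = max(L, key=lambda k: L[k]); return L[longest]'.
-- max over a nonempty dict's keys is PySem.List.max? on L.keys; the 'none' arm is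
-- unreachable (keys nonempty there) and only makes the match total.
-- L[k] for k ∈ L is ported as getD k 0 (never hits the default).
def getLenLongestStr (strs : List String) : Int :=
  let L : PySem.Dict String Int :=
    strs.foldl (fun d s => d.insert s (PySem.Str.len s)) PySem.Dict.empty
  if L.size = 0 then 0
  else
    match PySem.List.max? L.keys (fun k => L.getD k 0) with
    | some longest => L.getD longest 0
    | none => 0

-- ===== PORT B =====
-- 'longest = 0; for s in strs: longest = max(longest, len(s)); return longest'
def getLenLongestStr_alt (strs : List String) : Int :=
  strs.foldl (fun longest s => max longest (PySem.Str.len s)) 0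

-- ===== PRECONDITION & SPEC =====
def Spec_getLenLongestStr (strs : List String) (out : Int) : Prop := out = getLenLongestStr_alt strs
instance (strs : List String) (out : Int) : Decidable (Spec_getLenLongestStr strs out) := by unfold Spec_getLenLongestStr; infer_instance

-- ===== CLAIM (what is proved, stated in full; the proofs are below) =====
def Claim_equal_getLenLongestStr : Prop := ∀ (strs : List String), Dom_getLenLongestStr strs → Spec_getLenLongestStr strs (getLenLongestStr strs)

-- ===== LEMMAS AND PROOFS =====

-- The dict A builds, abstracted over the starting dict (for the inductions).
def pvBuild (l : List String) (d : PySem.Dict String Int) : PySem.Dict String Int :=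
  l.foldl (fun d s => d.insert s (PySem.Str.len s)) d

theorem pvBuild_contains (l : List String) (d : PySem.Dict String Int) (k : String) :
    (pvBuild l d).contains k = true ↔ d.contains k = true ∨ k ∈ l := by
  induction l generalizing d with
  | nil => simp [pvBuild]
  | cons s t ih =>
      simp only [pvBuild, List.foldl_cons] at *
      rw [ih]
      simp only [PySem.Dict.contains_insert, Bool.or_eq_true, beq_iff_eq, List.mem_cons]
      tauto

theorem pvBuild_getD (l : List String) (d : PySem.Dict String Int) (k : String) :
    (pvBuild l d).getD k 0 = if k ∈ l then PySem.Str.len k else d.getD k 0 := by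
  induction l generalizing d with
  | nil => simp [pvBuild]
  | cons s t ih =>
      simp only [pvBuild, List.foldl_cons] at *
      rw [ih]
      by_cases hkt : k ∈ t
      · simp [hkt]
      · by_cases hks : k = s
        · subst hks; simp [hkt, PySem.Dict.getD_insert_self]
        · simp [hkt, hks, PySem.Dict.getD_insert_of_ne _ _ _ hks]

-- B's running maximum stays below any bound dominating 0 and every length.
theorem pvFoldlMax_le (xs : List String) (init bound : Int) (h0 : init ≤ bound)
    (h : ∀ x ∈ xs, PySem.Str.len x ≤ bound) :
    xs.foldl (fun m s => max m (PySem.Str.len s)) init ≤ bound := by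
  induction xs generalizing init with
  | nil => simpa using h0
  | cons s t ih =>
      simp only [List.foldl_cons]
      exact ih _ (max_le h0 (h s (by simp))) (fun x hx => h x (by simp [hx]))

theorem getLenLongestStr_spec' (strs : List String) :
    getLenLongestStr strs = getLenLongestStr_alt strs := by
  cases strs with
  | nil => rfl
  | cons s0 t =>
      have L := pvBuild (s0 :: t) PySem.Dict.empty
      unfold getLenLongestStr getLenLongestStr_alt
      simp only []
      set L := (s0 :: t).foldl (fun d s => d.insert s (PySem.Str.len s)) PySem.Dict.empty with hL
      have hLb : L = pvBuild (s0 :: t) PySem.Dict.empty := rfl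
      -- s0 is a key of L, hence L is nonempty
      have hc : L.contains s0 = true := by
        rw [hLb, pvBuild_contains]; simp
      have hk0 : s0 ∈ L.keys := (PySem.Dict.contains_iff_mem_keys L s0).mp hc
      have hkeys : L.keys ≠ [] := by intro h; rw [h] at hk0; exact absurd hk0 (by simp)
      have hsize : ¬ L.size = 0 := by
        intro h
        apply hkeys
        have : L.items = [] := List.length_eq_zero_iff.mp h
        simp [PySem.Dict.keys, this]
      rw [if_neg hsize]
      -- the max over keys exists
      cases hmax : PySem.List.max? L.keys (fun k => L.getD k 0) with
      | none => exact absurd ((PySem.List.max?_eq_none_iff _ _).mp hmax) hkeys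
      | some longest =>
          have hmem : longest ∈ L.keys := PySem.List.max?_mem hmax
          have hmemStr : longest ∈ s0 :: t := by
            have := (PySem.Dict.contains_iff_mem_keys L longest).mpr hmem
            rw [hLb, pvBuild_contains] at this
            rcases this with h | h
            · simp [PySem.Dict.contains, PySem.Dict.empty] at h
            · exact h
          have hval : L.getD longest 0 = PySem.Str.len longest := by
            rw [hLb, pvBuild_getD]; simp [hmemStr]
          have hub : ∀ x ∈ s0 :: t, PySem.Str.len x ≤ PySem.Str.len longest := by
            intro x hx
            have hxk : x ∈ L.keys := (PySem.Dict.contains_iff_mem_keys L x).mp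
              (by rw [hLb, pvBuild_contains]; exact Or.inr hx)
            have := PySem.List.max?_isMax hmax x hxk
            rw [hval] at this
            rwa [hLb, pvBuild_getD, if_pos hx] at this
          have h0 : (0 : Int) ≤ PySem.Str.len longest := by
            rw [PySem.Str.len_eq]; positivity
          have hge : PySem.Str.len longest ≤
              (s0 :: t).foldl (fun m s => max m (PySem.Str.len s)) 0 :=
            (PySem.List.le_foldl_max_int (s0 :: t) PySem.Str.len 0).2 longest hmemStr
          have hle : (s0 :: t).foldl (fun m s => max m (PySem.Str.len s)) 0 ≤
              PySem.Str.len longest := pvFoldlMax_le _ _ _ h0 hub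
          show L.getD longest 0 = _
          rw [hval]
          exact le_antisymm hge hle

-- ===== VERDICT (by name: the statement is the Claim_ definition above) =====
theorem getLenLongestStr_spec : Claim_equal_getLenLongestStr := by
  intro strs _
  exact getLenLongestStr_spec' strs
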